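-- pv_equiv track=rewrite | github.com/KSjors/TriL2Net | utils/help_functions.py | original_node_number
-- ===== SOURCE A (Python) =====
-- def original_node_number(node_number, other_node_numbers):
--     while True:
--         node_numbers_below = [other_node_number for other_node_number in other_node_numbers if other_node_number <= node_number]
--         other_node_numbers = [other_node_number for other_node_number in other_node_numbers if other_node_number > node_number]
--         if len(node_numbers_below) >= 1:
--             node_number += len(node_numbers_below)
--         else:
--             break
--     return node_number
-- ===== SOURCE B (Python) =====
-- def original_node_number(node_number, other_node_numbers):
--     for v in sorted(other_node_numbers):
--         if v <= node_number:
--             node_number += 1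
--     return node_number
-- ===== Notes on version B (the rewrite author's own statement) =====
-- stated objective: alternative
-- what changed: Replaces the repeated filter-and-recount while-loop with a single sort followed by one pass that increments node_number for each value at most the current node_number.
import Mathlib
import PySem

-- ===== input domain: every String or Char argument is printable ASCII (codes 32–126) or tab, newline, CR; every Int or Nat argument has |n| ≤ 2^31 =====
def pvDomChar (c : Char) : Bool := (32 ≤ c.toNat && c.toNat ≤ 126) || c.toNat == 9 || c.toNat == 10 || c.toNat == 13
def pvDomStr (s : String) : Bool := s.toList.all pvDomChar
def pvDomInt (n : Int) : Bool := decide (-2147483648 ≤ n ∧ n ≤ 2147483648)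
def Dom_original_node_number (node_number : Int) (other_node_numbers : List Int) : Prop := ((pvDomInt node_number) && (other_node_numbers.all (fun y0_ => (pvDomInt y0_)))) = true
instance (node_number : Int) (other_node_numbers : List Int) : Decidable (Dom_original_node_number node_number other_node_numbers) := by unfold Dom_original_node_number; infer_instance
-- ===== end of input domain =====

-- B replaces A's repeated filter-and-recount loop by a sort followed by one accumulating pass.


-- ===== PORT A =====
-- while True: split remaining list into ≤ node_number and > node_number; add the count of the
-- former; stop when nothing is below.  Well-founded on the remaining list's length.
def original_node_number (node_number : Int) (other_node_numbers : List Int) : Int :=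
  let node_numbers_below := other_node_numbers.filter (fun x => x ≤ node_number)
  let rest := other_node_numbers.filter (fun x => x > node_number)
  if node_numbers_below.length ≥ 1 then
    original_node_number (node_number + node_numbers_below.length) rest
  else
    node_number
termination_by other_node_numbers.length
decreasing_by
  rename_i h
  have h1 := h
  simp only [node_numbers_below, List.length_unattach] at h1
  rcases List.exists_mem_of_length_pos (Nat.lt_of_lt_of_le Nat.zero_lt_one h1) with ⟨a, ha⟩
  obtain ⟨x, hx⟩ := a
  have hle := List.of_mem_filter ha
  simp only [decide_eq_true_eq] at hle
  simp only [List.length_unattach]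
  rw [← List.length_attach (l := other_node_numbers), List.length_filter_lt_length_iff_exists]
  exact ⟨⟨x, hx⟩, List.mem_attach _ _, by simp; omega⟩

-- ===== PORT B =====
-- for v in sorted(other_node_numbers): if v <= node_number: node_number += 1
def original_node_number_alt (node_number : Int) (other_node_numbers : List Int) : Int :=
  (PySem.List.sorted other_node_numbers (fun x => x) false).foldl
    (fun acc v => if v ≤ acc then acc + 1 else acc) node_number

-- ===== PRECONDITION & SPEC =====
def Spec_original_node_number (node_number : Int) (other_node_numbers : List Int) (out : Int) : Prop := out = original_node_number_alt node_number other_node_numbers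
instance (node_number : Int) (other_node_numbers : List Int) (out : Int) : Decidable (Spec_original_node_number node_number other_node_numbers out) := by unfold Spec_original_node_number; infer_instance

-- ===== CLAIM (what is proved, stated in full; the proofs are below) =====
def Claim_equal_original_node_number : Prop := ∀ (node_number : Int) (other_node_numbers : List Int), Dom_original_node_number node_number other_node_numbers → Spec_original_node_number node_number other_node_numbers (original_node_number node_number other_node_numbers)

-- ===== LEMMAS AND PROOFS =====

-- Folding B's step over a list whose elements are all ≤ n just counts the list.
theorem pv_fold_all_le (s : List Int) : ∀ n : Int, (∀ x ∈ s, x ≤ n) →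
    s.foldl (fun acc v => if v ≤ acc then acc + 1 else acc) n = n + s.length := by
  induction s with
  | nil => intro n _; simp
  | cons a t ih =>
    intro n h
    have ha : a ≤ n := h a (List.mem_cons_self ..)
    simp only [List.foldl_cons, if_pos ha]
    rw [ih (n + 1) (fun x hx => le_trans (h x (List.mem_cons_of_mem _ hx)) (by omega))]
    simp [List.length_cons]; omega

-- Folding B's step over a list whose elements are all > n leaves n unchanged.
theorem pv_fold_all_gt (s : List Int) : ∀ n : Int, (∀ x ∈ s, n < x) →
    s.foldl (fun acc v => if v ≤ acc then acc + 1 else acc) n = n := by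
  induction s with
  | nil => intro n _; simp
  | cons a t ih =>
    intro n h
    have ha : n < a := h a (List.mem_cons_self ..)
    simp only [List.foldl_cons, if_neg (by omega : ¬ a ≤ n)]
    exact ih n (fun x hx => h x (List.mem_cons_of_mem _ hx))

-- sorted l splits as sorted(≤ n part) ++ sorted(> n part).
theorem pv_sorted_split (l : List Int) (n : Int) :
    PySem.List.sorted l (fun x => x) false =
      PySem.List.sorted (l.filter (fun x => x ≤ n)) (fun x => x) false ++
      PySem.List.sorted (l.filter (fun x => x > n)) (fun x => x) false := by
  apply PySem.List.sorted_id_eq_of_perm_of_pairwise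
  · have p1 : (PySem.List.sorted (l.filter (fun x => x ≤ n)) (fun x => x) false ++
          PySem.List.sorted (l.filter (fun x => x > n)) (fun x => x) false).Perm
        (l.filter (fun x => x ≤ n) ++ l.filter (fun x => x > n)) :=
      List.Perm.append (PySem.List.sorted_perm _ _ _) (PySem.List.sorted_perm _ _ _)
    have hcongr : l.filter (fun x => x > n) = l.filter (fun x => !decide (x ≤ n)) := by
      apply List.filter_congr
      intro x _
      by_cases hx : x ≤ n <;> simp [hx]
      omega
    have p2 : (l.filter (fun x => x ≤ n) ++ l.filter (fun x => x > n)).Perm l := by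
      rw [hcongr]
      exact List.filter_append_perm (fun x => decide (x ≤ n)) l
    exact p1.trans p2
  · rw [List.pairwise_append]
    refine ⟨PySem.List.sorted_pairwise _ _, PySem.List.sorted_pairwise _ _, ?_⟩
    intro a ha b hb
    have ha' : a ≤ n := by
      have := (PySem.List.mem_sorted _ _ _ _).mp ha
      simpa using (List.mem_filter.mp this).2
    have hb' : n < b := by
      have := (PySem.List.mem_sorted _ _ _ _).mp hb
      simpa using (List.mem_filter.mp this).2
    omega

theorem pv_main : ∀ (m : Nat) (l : List Int), l.length ≤ m → ∀ n : Int,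
    original_node_number n l = original_node_number_alt n l := by
  intro m
  induction m with
  | zero =>
    intro l hl n
    have : l = [] := List.eq_nil_of_length_eq_zero (Nat.le_zero.mp hl)
    subst this
    unfold original_node_number
    simp [original_node_number_alt, PySem.List.sorted]
  | succ m ih =>
    intro l hl n
    unfold original_node_number
    simp only [original_node_number_alt]
    rw [pv_sorted_split l n, List.foldl_append]
    by_cases hb : (l.filter (fun x => x ≤ n)).length ≥ 1
    · rw [if_pos hb]
      have hle : ∀ x ∈ PySem.List.sorted (l.filter (fun x => x ≤ n)) (fun x => x) false, x ≤ n := by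
        intro x hx
        have := (PySem.List.mem_sorted _ _ _ _).mp hx
        simpa using (List.mem_filter.mp this).2
      rw [pv_fold_all_le _ n hle, PySem.List.length_sorted]
      have hrest : (l.filter (fun x => x > n)).length ≤ m := by
        have h1 : (l.filter (fun x => x > n)).length < l.length := by
          rw [List.length_filter_lt_length_iff_exists]
          rcases List.exists_mem_of_length_pos (by omega : 0 < (l.filter (fun x => decide (x ≤ n))).length) with ⟨x, hx⟩
          rcases List.mem_filter.mp hx with ⟨hxm, hxle⟩
          exact ⟨x, hxm, by simpa using hxle⟩
        omega
      rw [ih _ hrest]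
      simp [original_node_number_alt]
    · rw [if_neg hb]
      have hbl : l.filter (fun x => x ≤ n) = [] := by
        have : (l.filter (fun x => x ≤ n)).length = 0 := by omega
        exact List.eq_nil_of_length_eq_zero this
      have hgt : ∀ x ∈ PySem.List.sorted (l.filter (fun x => x > n)) (fun x => x) false, n < x := by
        intro x hx
        have := (PySem.List.mem_sorted _ _ _ _).mp hx
        simpa using (List.mem_filter.mp this).2
      rw [hbl]
      simp only [PySem.List.sorted, List.foldl_nil]
      exact (pv_fold_all_gt _ n hgt).symm

-- ===== VERDICT (by name: the statement is the Claim_ definition above) =====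
theorem original_node_number_spec : Claim_equal_original_node_number := by
  intro n l _
  unfold Spec_original_node_number
  exact pv_main l.length l le_rfl n
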